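-- pv_equiv track=rewrite | github.com/skinnyandbald/fish-skills | skills/invoice/generate-invoice.py | parse_args
-- ===== SOURCE A (Python) =====
-- def parse_args(argv):
--     """Parse CLI arguments."""
--     config_path = None
--     output_dir = None
--     logo_path = None
--
--     i = 0
--     while i < len(argv):
--         if argv[i] == '--output-dir' and i + 1 < len(argv):
--             output_dir = argv[i + 1]
--             i += 2
--         elif argv[i] == '--logo' and i + 1 < len(argv):
--             logo_path = argv[i + 1]
--             i += 2
--         elif not argv[i].startswith('--'):
--             config_path = argv[i]
--             i += 1
--         else:
--             i += 1
--
--     return config_path, output_dir, logo_path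
-- ===== SOURCE B (Python) =====
-- def parse_args(argv):
--     """Parse CLI arguments."""
--     config_path = None
--     output_dir = None
--     logo_path = None
--
--     pending = None  # None / 'output' / 'logo'
--     for token in argv:
--         if pending == 'output':
--             output_dir = token
--             pending = None
--         elif pending == 'logo':
--             logo_path = token
--             pending = None
--         elif token == '--output-dir':
--             pending = 'output'
--         elif token == '--logo':
--             pending = 'logo'
--         elif not token.startswith('--'):
--             config_path = token
--
--     return config_path, output_dir, logo_path
-- ===== Notes on version B (the rewrite author's own statement) =====
-- stated objective: simpler
-- what changed: Replaced the manual index loop with i+=2 lookahead by a single for-pass state machine that keeps a 'pending' flag and assigns the next token to it unconditionally.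
import Mathlib
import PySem

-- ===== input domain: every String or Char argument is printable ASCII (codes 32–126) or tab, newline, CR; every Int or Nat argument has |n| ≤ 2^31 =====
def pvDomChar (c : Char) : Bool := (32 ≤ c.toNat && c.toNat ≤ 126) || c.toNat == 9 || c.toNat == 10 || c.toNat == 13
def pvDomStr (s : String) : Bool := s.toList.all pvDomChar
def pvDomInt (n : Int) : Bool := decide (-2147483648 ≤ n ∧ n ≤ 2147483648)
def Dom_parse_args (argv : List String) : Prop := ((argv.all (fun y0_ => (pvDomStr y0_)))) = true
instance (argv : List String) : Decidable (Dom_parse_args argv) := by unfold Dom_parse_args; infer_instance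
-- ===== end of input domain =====

-- B is a simpler one-token-at-a-time state machine ('pending' flag) replacing A's index loop with lookahead; return value only, no side effects.

-- ===== PORT A =====
-- A's while loop advances i by 2 when a flag with a following value is seen,
-- else by 1; ported as recursion on the remaining suffix of argv.
def parse_args_loop (l : List String) (cfg out logo : Option String) :
    Option String × Option String × Option String :=
  match l with
  | [] => (cfg, out, logo)
  | [x] =>
    -- here i + 1 < len(argv) is false, so the flag branches cannot fire
    if ¬ PySem.Str.startswith x "--" then (some x, out, logo)
    else (cfg, out, logo)
  | x :: v :: rest =>
    if x = "--output-dir" then parse_args_loop rest cfg (some v) logo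
    else if x = "--logo" then parse_args_loop rest cfg out (some v)
    else if ¬ PySem.Str.startswith x "--" then parse_args_loop (v :: rest) (some x) out logo
    else parse_args_loop (v :: rest) cfg out logo

def parse_args (argv : List String) : Option String × Option String × Option String :=
  parse_args_loop argv none none none

-- ===== PORT B =====
inductive PendB | nil | output | logo
deriving DecidableEq, Repr

def parse_args_step (st : (Option String × Option String × Option String) × PendB)
    (tok : String) : (Option String × Option String × Option String) × PendB :=
  match st with
  | ((cfg, out, logo), p) =>
    if p = PendB.output then ((cfg, some tok, logo), PendB.nil)
    else if p = PendB.logo then ((cfg, out, some tok), PendB.nil)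
    else if tok = "--output-dir" then ((cfg, out, logo), PendB.output)
    else if tok = "--logo" then ((cfg, out, logo), PendB.logo)
    else if ¬ PySem.Str.startswith tok "--" then ((some tok, out, logo), p)
    else ((cfg, out, logo), p)

def parse_args_alt (argv : List String) : Option String × Option String × Option String :=
  (argv.foldl parse_args_step ((none, none, none), PendB.nil)).1

-- ===== PRECONDITION & SPEC =====
def Spec_parse_args (argv : List String) (out : Option String × Option String × Option String) : Prop := out = parse_args_alt argv
instance (argv : List String) (out : Option String × Option String × Option String) : Decidable (Spec_parse_args argv out) := by unfold Spec_parse_args; infer_instance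

-- ===== CLAIM (what is proved, stated in full; the proofs are below) =====
def Claim_equal_parse_args : Prop := ∀ (argv : List String), Dom_parse_args argv → Spec_parse_args argv (parse_args argv)

-- ===== LEMMAS AND PROOFS =====

-- flags start with "--", so the startswith test is false for them is irrelevant;
-- key fact used in the non-flag branch: a non-flag token leaves pending at nil.
theorem parse_args_loop_eq (l : List String) (cfg out logo : Option String) :
    parse_args_loop l cfg out logo = (l.foldl parse_args_step ((cfg, out, logo), PendB.nil)).1 := by
  fun_induction parse_args_loop l cfg out logo with
  | case1 cfg out logo => simp
  | case2 cfg out logo x h =>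
      have hx : PySem.Chars.startswith x.toList ['-', '-'] = false := by
        simpa [PySem.Str.startswith] using h
      have h1 : x ≠ "--output-dir" := by rintro rfl; exact absurd hx (by decide)
      have h2 : x ≠ "--logo" := by rintro rfl; exact absurd hx (by decide)
      simp [parse_args_step, hx, h1, h2]
  | case3 cfg out logo x h =>
      have hx : PySem.Chars.startswith x.toList ['-', '-'] = true := by
        simpa [PySem.Str.startswith] using h
      simp [parse_args_step, hx]
      split_ifs <;> simp_all
  | case4 cfg out logo v rest ih =>
      simp [parse_args_step, ih]
  | case5 cfg out logo v rest h1 ih =>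
      simp [parse_args_step, h1, ih]
  | case6 cfg out logo x v rest h1 h2 h3 ih =>
      have hx : PySem.Chars.startswith x.toList ['-', '-'] = false := by
        simpa [PySem.Str.startswith] using h3
      simp [parse_args_step, h1, h2, hx, ih]
  | case7 cfg out logo x v rest h1 h2 h3 ih =>
      have hx : PySem.Chars.startswith x.toList ['-', '-'] = true := by
        simpa [PySem.Str.startswith] using h3
      simp [parse_args_step, h1, h2, hx, ih]

-- ===== VERDICT (by name: the statement is the Claim_ definition above) =====
theorem parse_args_spec : Claim_equal_parse_args := by
  intro argv _
  unfold Spec_parse_args parse_args parse_args_alt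
  exact parse_args_loop_eq argv none none none
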